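-- pv_equiv track=rewrite | github.com/wang-bill/riscalar | assembly_tests/assembler/handmade_assembler.py | sanitize_inst
-- ===== SOURCE A (Python) =====
-- def sanitize_inst(inst_type, inst_components):
--   '''
--   Sanitizes instruction (get rid of commas, spaces, etc.)
--   Extracts values from parantheses
--   '''
--   sanitized_inst = []
--   if inst_type == "R": # add a1, a1, a2 -> [add, a1, a1, a2]
--     for i in range(len(inst_components)):
--       if i == 1 or i == 2:
--         sanitized_inst.append(inst_components[i][:-1].strip()) # get rid of trailing comma
--       else:
--         sanitized_inst.append(inst_components[i].strip())
--
--   if inst_type == "I":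
--     inst_name = inst_components[0]
--     if inst_name in ["lb", "lh", "lw", "lbu", "lhu"]: # lw a1 40(x0) -> [lw, a1, 40, x0]
--       for i in range(len(inst_components)):
--         if i == 1:
--           sanitized_inst.append(inst_components[i][:-1].strip())
--         elif i == 2:
--           offset_rs1 = inst_components[2].split("(")
--           sanitized_inst.append(offset_rs1[0].strip())
--           sanitized_inst.append(offset_rs1[1][:-1].strip()) # get rid of parantheses
--         else:
--           sanitized_inst.append(inst_components[i].strip())
--     else: # addi a1, a1, 6 -> [addi, a1, a1, 6]
--       for i in range(len(inst_components)):
--         if i == 1 or i == 2: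
--           sanitized_inst.append(inst_components[i][:-1].strip()) # get rid of trailing comma
--         else:
--           sanitized_inst.append(inst_components[i].strip())
--
--   if inst_type == "S": # sw a2, 40(a1) -> [sw, a2, 40, a1]
--     for i in range(len(inst_components)):
--       if i == 1:
--         sanitized_inst.append(inst_components[i][:-1].strip())
--       elif i == 2:
--         offset_rs1 = inst_components[2].split("(")
--         sanitized_inst.append(offset_rs1[0].strip())
--         sanitized_inst.append(offset_rs1[1][:-1].strip()) # get rid of parantheses
--       else:
--         sanitized_inst.append(inst_components[i].strip())
--
--   if inst_type == "B": # beq a1, a2, 40 -> [beq, a1, a2, 40]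
--     for i in range(len(inst_components)):
--       if i == 1 or i == 2:
--         sanitized_inst.append(inst_components[i][:-1].strip()) # get rid of trailing comma
--       else:
--         sanitized_inst.append(inst_components[i].strip())
--
--   if inst_type == "J": # jal a1, 40 -> [jal, a1, 40]
--     for i in range(len(inst_components)):
--       if i == 1:
--         sanitized_inst.append(inst_components[i][:-1].strip()) # get rid of trailing comma
--       else:
--         sanitized_inst.append(inst_components[i].strip())
--
--   if inst_type == "U": # lui a1, 44 -> [lui, a1, 44]
--     for i in range(len(inst_components)):
--       if i == 1:
--         sanitized_inst.append(inst_components[i][:-1].strip()) # get rid of trailing comma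
--       else:
--         sanitized_inst.append(inst_components[i].strip())
--
--   return sanitized_inst
-- ===== SOURCE B (Python) =====
-- # Slice-based staged construction: head/comma/middle/tail segments assembled by
-- # list slicing and mapping, with a single three-way selector for the middle
-- # segment, instead of A's six duplicated per-index branching loops.
--
-- _LOADS = ("lb", "lh", "lw", "lbu", "lhu")
--
--
-- def _strips(seg):
--     return [t.strip() for t in seg]
--
--
-- def _chops(seg):
--     return [t[:-1].strip() for t in seg]
--
--
-- def _parens(seg):
--     return [p for t in seg
--               for p in (t.split("(")[0].strip(), t.split("(")[1][:-1].strip())]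
--
--
-- def sanitize_inst(inst_type, inst_components):
--     cs = inst_components
--     if inst_type == "S" or (inst_type == "I" and cs[0] in _LOADS):
--         mid = _parens(cs[2:3])
--     elif inst_type in ("R", "I", "B"):
--         mid = _chops(cs[2:3])
--     elif inst_type in ("J", "U"):
--         mid = _strips(cs[2:3])
--     else:
--         return []
--     return _strips(cs[:1]) + _chops(cs[1:2]) + mid + _strips(cs[3:])
-- ===== Notes on version B (the rewrite author's own statement) =====
-- stated objective: simpler
-- what changed: Replaces A's six duplicated per-index branching loops by a staged slice-based construction: the result is assembled as strips(cs[:1]) + chops(cs[1:2]) + middle(cs[2:3]) + strips(cs[3:]), where only the middle segment's treatment (paren-split, comma-chop, or plain strip) is selected per instruction type; no index loop or per-element branching remains.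
import Mathlib
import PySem

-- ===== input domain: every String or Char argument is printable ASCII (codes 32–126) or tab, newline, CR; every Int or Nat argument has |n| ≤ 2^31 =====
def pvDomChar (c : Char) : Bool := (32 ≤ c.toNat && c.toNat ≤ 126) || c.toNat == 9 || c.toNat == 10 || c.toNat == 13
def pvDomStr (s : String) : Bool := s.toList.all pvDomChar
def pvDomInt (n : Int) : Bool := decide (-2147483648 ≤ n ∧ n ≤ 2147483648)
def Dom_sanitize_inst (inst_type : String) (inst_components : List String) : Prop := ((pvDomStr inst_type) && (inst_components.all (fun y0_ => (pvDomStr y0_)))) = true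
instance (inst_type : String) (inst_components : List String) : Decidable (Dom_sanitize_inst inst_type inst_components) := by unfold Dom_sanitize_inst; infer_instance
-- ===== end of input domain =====

-- B rebuilds the result from list slices (head / comma / middle / tail segments with a
-- three-way middle selector) instead of A's six duplicated per-index branching loops
-- (objective: simpler).

-- ===== PORT A =====
-- x[:-1].strip()
def pvStripComma (s : String) : String := PySem.Str.strip (PySem.Str.slice s none (some (-1)))

def sanitize_inst (inst_type : String) (inst_components : List String) : List String :=
  let s0 : List String := []
  let s1 :=
    if inst_type = "R" then
      (PySem.List.pyRange 0 (inst_components.length : Int) 1).foldl (fun acc i =>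
        if i = 1 ∨ i = 2 then acc ++ [pvStripComma (PySem.List.pyGetD inst_components i "")]
        else acc ++ [PySem.Str.strip (PySem.List.pyGetD inst_components i "")]) s0
    else s0
  let s2 :=
    if inst_type = "I" then
      let inst_name := PySem.List.pyGetD inst_components 0 ""   -- IndexError on [] is excluded by Pre_
      if inst_name ∈ ["lb", "lh", "lw", "lbu", "lhu"] then
        (PySem.List.pyRange 0 (inst_components.length : Int) 1).foldl (fun acc i =>
          if i = 1 then acc ++ [pvStripComma (PySem.List.pyGetD inst_components i "")]
          else if i = 2 then
            let offset_rs1 := (PySem.Str.split? (PySem.List.pyGetD inst_components 2 "") "(").getD []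
            acc ++ [PySem.Str.strip (PySem.List.pyGetD offset_rs1 0 "")]
                ++ [pvStripComma (PySem.List.pyGetD offset_rs1 1 "")]   -- IndexError without '(' is excluded by Pre_
          else acc ++ [PySem.Str.strip (PySem.List.pyGetD inst_components i "")]) s1
      else
        (PySem.List.pyRange 0 (inst_components.length : Int) 1).foldl (fun acc i =>
          if i = 1 ∨ i = 2 then acc ++ [pvStripComma (PySem.List.pyGetD inst_components i "")]
          else acc ++ [PySem.Str.strip (PySem.List.pyGetD inst_components i "")]) s1
    else s1
  let s3 :=
    if inst_type = "S" then
      (PySem.List.pyRange 0 (inst_components.length : Int) 1).foldl (fun acc i =>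
        if i = 1 then acc ++ [pvStripComma (PySem.List.pyGetD inst_components i "")]
        else if i = 2 then
          let offset_rs1 := (PySem.Str.split? (PySem.List.pyGetD inst_components 2 "") "(").getD []
          acc ++ [PySem.Str.strip (PySem.List.pyGetD offset_rs1 0 "")]
              ++ [pvStripComma (PySem.List.pyGetD offset_rs1 1 "")]
        else acc ++ [PySem.Str.strip (PySem.List.pyGetD inst_components i "")]) s2
    else s2
  let s4 :=
    if inst_type = "B" then
      (PySem.List.pyRange 0 (inst_components.length : Int) 1).foldl (fun acc i =>
        if i = 1 ∨ i = 2 then acc ++ [pvStripComma (PySem.List.pyGetD inst_components i "")]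
        else acc ++ [PySem.Str.strip (PySem.List.pyGetD inst_components i "")]) s3
    else s3
  let s5 :=
    if inst_type = "J" then
      (PySem.List.pyRange 0 (inst_components.length : Int) 1).foldl (fun acc i =>
        if i = 1 then acc ++ [pvStripComma (PySem.List.pyGetD inst_components i "")]
        else acc ++ [PySem.Str.strip (PySem.List.pyGetD inst_components i "")]) s4
    else s4
  let s6 :=
    if inst_type = "U" then
      (PySem.List.pyRange 0 (inst_components.length : Int) 1).foldl (fun acc i =>
        if i = 1 then acc ++ [pvStripComma (PySem.List.pyGetD inst_components i "")]
        else acc ++ [PySem.Str.strip (PySem.List.pyGetD inst_components i "")]) s5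
    else s5
  s6

-- ===== PORT B =====
def pvLoads : List String := ["lb", "lh", "lw", "lbu", "lhu"]

-- [t.strip() for t in seg]
def pvStrips (seg : List String) : List String := seg.map PySem.Str.strip

-- [t[:-1].strip() for t in seg]
def pvChops (seg : List String) : List String :=
  seg.map (fun t => PySem.Str.strip (PySem.Str.slice t none (some (-1))))

-- [p for t in seg for p in (t.split("(")[0].strip(), t.split("(")[1][:-1].strip())]
def pvParens (seg : List String) : List String :=
  seg.flatMap (fun t =>
    [PySem.Str.strip (PySem.List.pyGetD ((PySem.Str.split? t "(").getD []) 0 ""),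
     PySem.Str.strip (PySem.Str.slice (PySem.List.pyGetD ((PySem.Str.split? t "(").getD []) 1 "") none (some (-1)))])

def sanitize_inst_alt (inst_type : String) (inst_components : List String) : List String :=
  let cs := inst_components
  let mid? : Option (List String) :=
    if inst_type = "S" ∨ (inst_type = "I" ∧ PySem.List.pyGetD cs 0 "" ∈ pvLoads) then
      some (pvParens (PySem.List.slice cs (some 2) (some 3)))
    else if inst_type = "R" ∨ inst_type = "I" ∨ inst_type = "B" then
      some (pvChops (PySem.List.slice cs (some 2) (some 3)))
    else if inst_type = "J" ∨ inst_type = "U" then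
      some (pvStrips (PySem.List.slice cs (some 2) (some 3)))
    else none
  match mid? with
  | none => []
  | some mid =>
      pvStrips (PySem.List.slice cs none (some 1)) ++ pvChops (PySem.List.slice cs (some 1) (some 2))
        ++ mid ++ pvStrips (PySem.List.slice cs (some 3) none)

-- ===== PRECONDITION & SPEC =====
-- Pre_ excludes exactly the inputs where Python A raises IndexError: inst_type "I" with no
-- components (inst_components[0]), and a load/"S" instruction whose third component has no '('
-- (offset_rs1[1] after split).
def Pre_sanitize_inst (inst_type : String) (inst_components : List String) : Prop :=
  (inst_type = "I" → inst_components ≠ []) ∧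
  ((inst_type = "S" ∨ (inst_type = "I" ∧ inst_components.getD 0 "" ∈ ["lb", "lh", "lw", "lbu", "lhu"])) →
    3 ≤ inst_components.length →
    PySem.Str.isIn "(" (inst_components.getD 2 "") = true)

instance (inst_type : String) (inst_components : List String) : Decidable (Pre_sanitize_inst inst_type inst_components) := by
  unfold Pre_sanitize_inst; infer_instance

def pvWitness_sanitize_inst : String × List String := ("S", ["sw", "a2,", "40(a1)"])

def Spec_sanitize_inst (inst_type : String) (inst_components : List String) (out : List String) : Prop := out = sanitize_inst_alt inst_type inst_components
instance (inst_type : String) (inst_components : List String) (out : List String) : Decidable (Spec_sanitize_inst inst_type inst_components out) := by unfold Spec_sanitize_inst; infer_instance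

-- ===== CLAIM (what is proved, stated in full; the proofs are below) =====
def Claim_equal_sanitize_inst : Prop := ∀ (inst_type : String) (inst_components : List String), Dom_sanitize_inst inst_type inst_components → Pre_sanitize_inst inst_type inst_components → Spec_sanitize_inst inst_type inst_components (sanitize_inst inst_type inst_components)

-- ===== LEMMAS AND PROOFS =====

theorem pvEnumerate_append_singleton {α : Type} (ds : List α) (x : α) :
    ∀ s : Int, PySem.List.enumerate (ds ++ [x]) s
      = PySem.List.enumerate ds s ++ [(s + ds.length, x)] := by
  induction ds with
  | nil => intro s; simp [PySem.List.enumerate_cons]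
  | cons d ds ih =>
      intro s
      simp only [List.cons_append, PySem.List.enumerate_cons, ih (s + 1), List.length_cons]
      have h : s + 1 + (ds.length : Int) = s + ((ds.length : Int) + 1) := by ring
      push_cast
      rw [h]

-- an index loop over range(len(cs)) reading cs[i] equals an enumerate traversal
theorem pvLoopEq (g : Int → String → List String) (cs : List String) :
    (PySem.List.pyRange 0 (cs.length : Int) 1).flatMap (fun i => g i (PySem.List.pyGetD cs i ""))
      = (PySem.List.enumerate cs 0).flatMap (fun p => g p.1 p.2) := by
  induction cs using List.reverseRecOn with
  | nil => simp [PySem.List.pyRange_one_eq_nil (by omega : (0:Int) ≤ 0)]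
  | append_singleton ds x ih =>
      have hlen : ((ds ++ [x]).length : Int) = (ds.length : Int) + 1 := by
        simp
      rw [hlen, PySem.List.pyRange_one_succ_right (by positivity),
          pvEnumerate_append_singleton ds x 0, List.flatMap_append, List.flatMap_append]
      have h1 : (PySem.List.pyRange 0 (ds.length : Int) 1).flatMap
            (fun i => g i (PySem.List.pyGetD (ds ++ [x]) i ""))
          = (PySem.List.pyRange 0 (ds.length : Int) 1).flatMap
            (fun i => g i (PySem.List.pyGetD ds i "")) := by
        apply List.flatMap_congr
        intro i hi
        rcases (PySem.List.mem_pyRange_one).1 hi with ⟨h0, hlt⟩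
        rw [PySem.List.pyGetD_eq_getElem (ds ++ [x]) "" h0 (by simp; omega),
            PySem.List.pyGetD_eq_getElem ds "" h0 (by omega)]
        rw [List.getElem_append_left (by omega)]
      have h2 : PySem.List.pyGetD (ds ++ [x]) (ds.length : Int) "" = x := by
        rw [PySem.List.pyGetD_natCast]
        simp
      rw [h1, ih]
      simp [h2]

theorem pvFoldlEq (g : Int → String → List String) (cs : List String) (bodyA : List String → Int → List String)
    (hbody : ∀ acc i, bodyA acc i = acc ++ g i (PySem.List.pyGetD cs i "")) :
    (PySem.List.pyRange 0 (cs.length : Int) 1).foldl bodyA []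
      = (PySem.List.enumerate cs 0).flatMap (fun p => g p.1 p.2) := by
  have hA : (PySem.List.pyRange 0 (cs.length : Int) 1).foldl bodyA []
      = (PySem.List.pyRange 0 (cs.length : Int) 1).foldl
          (fun acc i => acc ++ g i (PySem.List.pyGetD cs i "")) [] := by
    apply PySem.List.foldl_congr_mem
    intro acc i _
    exact hbody acc i
  rw [hA, PySem.List.foldl_append_eq_flatMap]
  simpa using pvLoopEq g cs

-- tail of the enumerate traversal: from index 3 on, every token is just stripped
theorem pvTailEq (g : Int → String → List String)
    (ht : ∀ i x, 3 ≤ i → g i x = [PySem.Str.strip x]) :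
    ∀ (rest : List String) (s : Int), 3 ≤ s →
      (PySem.List.enumerate rest s).flatMap (fun p => g p.1 p.2)
        = rest.map PySem.Str.strip := by
  intro rest
  induction rest with
  | nil => intro s _; simp
  | cons r rest ih =>
      intro s hs
      simp only [PySem.List.enumerate_cons, List.flatMap_cons, List.map_cons,
        ht s r hs, ih (s + 1) (by omega)]
      rfl

-- segment decomposition of the enumerate traversal
theorem pvSegEq (g : Int → String → List String) (f2 : String → List String)
    (h0 : ∀ x, g 0 x = [PySem.Str.strip x])
    (h1 : ∀ x, g 1 x = [PySem.Str.strip (PySem.Str.slice x none (some (-1)))])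
    (h2 : ∀ x, g 2 x = f2 x)
    (ht : ∀ i x, 3 ≤ i → g i x = [PySem.Str.strip x])
    (cs : List String) :
    (PySem.List.enumerate cs 0).flatMap (fun p => g p.1 p.2)
      = pvStrips (cs.take 1) ++ pvChops ((cs.drop 1).take 1)
          ++ ((cs.drop 2).take 1).flatMap f2 ++ pvStrips (cs.drop 3) := by
  match cs with
  | [] => simp [pvStrips, pvChops]
  | [a] =>
      simp [PySem.List.enumerate_cons, h0, pvStrips, pvChops]
  | [a, b] =>
      simp [PySem.List.enumerate_cons, h0, h1, pvStrips, pvChops]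
  | a :: b :: c :: rest =>
      have he : PySem.List.enumerate (a :: b :: c :: rest) 0
          = (0, a) :: (1, b) :: (2, c) :: PySem.List.enumerate rest 3 := by
        simp only [PySem.List.enumerate_cons]
        norm_num
      rw [he]
      simp only [List.flatMap_cons, h0 a, h1 b, h2 c,
        pvTailEq g ht rest 3 (by omega)]
      simp [pvStrips, pvChops]

-- the one-element slices of B evaluated as drop/take
theorem pvSliceFacts (cs : List String) :
    PySem.List.slice cs none (some 1) = cs.take 1
    ∧ PySem.List.slice cs (some 1) (some 2) = (cs.drop 1).take 1
    ∧ PySem.List.slice cs (some 2) (some 3) = (cs.drop 2).take 1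
    ∧ PySem.List.slice cs (some 3) none = cs.drop 3 := by
  refine ⟨?_, ?_, ?_, ?_⟩
  · rw [PySem.List.slice_to cs (by omega : (0:Int) ≤ 1)]; simp
  · rw [PySem.List.slice_toNat cs (by omega : (0:Int) ≤ 1) (by omega : (0:Int) ≤ 2)]; simp
  · rw [PySem.List.slice_toNat cs (by omega : (0:Int) ≤ 2) (by omega : (0:Int) ≤ 3)]; simp
  · rw [PySem.List.slice_from cs (by omega : (0:Int) ≤ 3)]; simp

-- chop / strip / paren emitters used to instantiate pvSegEq
-- (names only; bodies are the same expressions as in the ports)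

theorem pvFlatMapSingleton {α β : Type} (f : α → β) (l : List α) :
    l.flatMap (fun x => [f x]) = l.map f := by
  induction l with
  | nil => rfl
  | cons a l ih => simp [ih]

theorem pvMidParen (cs : List String) :
    ((cs.drop 2).take 1).flatMap (fun _ =>
        [PySem.Str.strip (PySem.List.pyGetD ((PySem.Str.split? (PySem.List.pyGetD cs 2 "") "(").getD []) 0 ""),
         pvStripComma (PySem.List.pyGetD ((PySem.Str.split? (PySem.List.pyGetD cs 2 "") "(").getD []) 1 "")])
      = pvParens ((cs.drop 2).take 1) := by
  rcases Nat.lt_or_ge cs.length 3 with hlen | hlen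
  · rw [List.drop_eq_nil_of_le (by omega)]
    simp [pvParens]
  · have h2 : 2 < cs.length := by omega
    have hdrop : cs.drop 2 = cs[2] :: cs.drop 3 := List.drop_eq_getElem_cons h2
    have hget : PySem.List.pyGetD cs 2 "" = cs[2] := by
      rw [PySem.List.pyGetD_eq_getElem cs "" (by omega) (by norm_num; omega)]
      congr 1
    rw [hdrop]
    simp only [List.take_succ_cons, List.take_zero, List.flatMap_cons, List.flatMap_nil,
      List.append_nil, pvParens, hget, pvStripComma]

-- ===== VERDICT (by name: the statement is the Claim_ definition above) =====
theorem sanitize_inst_spec : Claim_equal_sanitize_inst := by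
  intro t cs _ _
  unfold Spec_sanitize_inst sanitize_inst sanitize_inst_alt
  obtain ⟨hs1, hs2, hs3, hs4⟩ := pvSliceFacts cs
  simp only [hs1, hs2, hs3, hs4]
  by_cases hR : t = "R"
  · subst hR
    simp only [String.reduceEq, reduceIte, false_or, false_and, or_false]
    rw [pvFoldlEq (fun i x => if i = 1 ∨ i = 2 then [pvStripComma x] else [PySem.Str.strip x]) cs
        _ (by intro acc i; by_cases h : i = 1 ∨ i = 2 <;> simp [h])]
    refine (pvSegEq (fun i x => if i = 1 ∨ i = 2 then [pvStripComma x] else [PySem.Str.strip x])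
        (fun x => [PySem.Str.strip (PySem.Str.slice x none (some (-1)))])
        (fun x => by norm_num) (fun x => by norm_num [pvStripComma])
        (fun x => by norm_num [pvStripComma])
        (fun i x hi => by norm_num [show ¬(i = 1 ∨ i = 2) by omega]) cs).trans ?_
    simp only [pvChops, pvFlatMapSingleton, pvStrips, List.map_take, List.map_drop]
  by_cases hI : t = "I"
  · subst hI
    simp only [String.reduceEq, reduceIte, true_and, false_or]
    by_cases hl : PySem.List.pyGetD cs 0 "" ∈ pvLoads
    · simp only [show (["lb", "lh", "lw", "lbu", "lhu"] : List String) = pvLoads from rfl, hl,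
        if_pos, or_true, if_true]
      rw [pvFoldlEq (fun i x =>
            if i = 1 then [pvStripComma x]
            else if i = 2 then
              [PySem.Str.strip (PySem.List.pyGetD ((PySem.Str.split? (PySem.List.pyGetD cs 2 "") "(").getD []) 0 ""),
               pvStripComma (PySem.List.pyGetD ((PySem.Str.split? (PySem.List.pyGetD cs 2 "") "(").getD []) 1 "")]
            else [PySem.Str.strip x]) cs
          _ (by intro acc i
                by_cases h1 : i = 1
                · simp [h1]
                · by_cases h2 : i = 2 <;> simp [h1, h2])]
      refine (pvSegEq (fun i x =>
            if i = 1 then [pvStripComma x]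
            else if i = 2 then
              [PySem.Str.strip (PySem.List.pyGetD ((PySem.Str.split? (PySem.List.pyGetD cs 2 "") "(").getD []) 0 ""),
               pvStripComma (PySem.List.pyGetD ((PySem.Str.split? (PySem.List.pyGetD cs 2 "") "(").getD []) 1 "")]
            else [PySem.Str.strip x]) (fun _ =>
          [PySem.Str.strip (PySem.List.pyGetD ((PySem.Str.split? (PySem.List.pyGetD cs 2 "") "(").getD []) 0 ""),
           pvStripComma (PySem.List.pyGetD ((PySem.Str.split? (PySem.List.pyGetD cs 2 "") "(").getD []) 1 "")])
        (fun x => by norm_num) (fun x => by norm_num [pvStripComma])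
        (fun x => by norm_num)
        (fun i x hi => by norm_num [show i ≠ 1 by omega, show i ≠ 2 by omega]) cs).trans ?_
      rw [pvMidParen cs]
    · simp only [show (["lb", "lh", "lw", "lbu", "lhu"] : List String) = pvLoads from rfl, hl,
        and_false, or_false, if_neg, false_or, if_false, reduceIte]
      rw [pvFoldlEq (fun i x => if i = 1 ∨ i = 2 then [pvStripComma x] else [PySem.Str.strip x]) cs
          _ (by intro acc i; by_cases h : i = 1 ∨ i = 2 <;> simp [h])]
      refine (pvSegEq (fun i x => if i = 1 ∨ i = 2 then [pvStripComma x] else [PySem.Str.strip x])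
          (fun x => [PySem.Str.strip (PySem.Str.slice x none (some (-1)))])
          (fun x => by norm_num) (fun x => by norm_num [pvStripComma])
          (fun x => by norm_num [pvStripComma])
          (fun i x hi => by norm_num [show ¬(i = 1 ∨ i = 2) by omega]) cs).trans ?_
      simp only [pvChops, pvFlatMapSingleton, pvStrips, List.map_take, List.map_drop]
  by_cases hS : t = "S"
  · subst hS
    simp only [String.reduceEq, reduceIte, true_or, false_and, or_false, if_true]
    rw [pvFoldlEq (fun i x =>
          if i = 1 then [pvStripComma x]
          else if i = 2 then
            [PySem.Str.strip (PySem.List.pyGetD ((PySem.Str.split? (PySem.List.pyGetD cs 2 "") "(").getD []) 0 ""),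
             pvStripComma (PySem.List.pyGetD ((PySem.Str.split? (PySem.List.pyGetD cs 2 "") "(").getD []) 1 "")]
          else [PySem.Str.strip x]) cs
        _ (by intro acc i
              by_cases h1 : i = 1
              · simp [h1]
              · by_cases h2 : i = 2 <;> simp [h1, h2])]
    refine (pvSegEq (fun i x =>
          if i = 1 then [pvStripComma x]
          else if i = 2 then
            [PySem.Str.strip (PySem.List.pyGetD ((PySem.Str.split? (PySem.List.pyGetD cs 2 "") "(").getD []) 0 ""),
             pvStripComma (PySem.List.pyGetD ((PySem.Str.split? (PySem.List.pyGetD cs 2 "") "(").getD []) 1 "")]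
          else [PySem.Str.strip x]) (fun _ =>
        [PySem.Str.strip (PySem.List.pyGetD ((PySem.Str.split? (PySem.List.pyGetD cs 2 "") "(").getD []) 0 ""),
         pvStripComma (PySem.List.pyGetD ((PySem.Str.split? (PySem.List.pyGetD cs 2 "") "(").getD []) 1 "")])
      (fun x => by norm_num) (fun x => by norm_num [pvStripComma])
      (fun x => by norm_num)
      (fun i x hi => by norm_num [show i ≠ 1 by omega, show i ≠ 2 by omega]) cs).trans ?_
    rw [pvMidParen cs]
  by_cases hB : t = "B"
  · subst hB
    simp only [String.reduceEq, reduceIte, false_or, false_and, or_false, or_true, if_true]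
    rw [pvFoldlEq (fun i x => if i = 1 ∨ i = 2 then [pvStripComma x] else [PySem.Str.strip x]) cs
        _ (by intro acc i; by_cases h : i = 1 ∨ i = 2 <;> simp [h])]
    refine (pvSegEq (fun i x => if i = 1 ∨ i = 2 then [pvStripComma x] else [PySem.Str.strip x])
        (fun x => [PySem.Str.strip (PySem.Str.slice x none (some (-1)))])
        (fun x => by norm_num) (fun x => by norm_num [pvStripComma])
        (fun x => by norm_num [pvStripComma])
        (fun i x hi => by norm_num [show ¬(i = 1 ∨ i = 2) by omega]) cs).trans ?_
    simp only [pvChops, pvFlatMapSingleton, pvStrips, List.map_take, List.map_drop]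
  by_cases hJ : t = "J"
  · subst hJ
    simp only [String.reduceEq, reduceIte, false_or, false_and, or_false, true_or, if_true]
    rw [pvFoldlEq (fun i x => if i = 1 then [pvStripComma x] else [PySem.Str.strip x]) cs
        _ (by intro acc i; by_cases h : i = 1 <;> simp [h])]
    refine (pvSegEq (fun i x => if i = 1 then [pvStripComma x] else [PySem.Str.strip x])
        (fun x => [PySem.Str.strip x])
        (fun x => by norm_num) (fun x => by norm_num [pvStripComma])
        (fun x => by norm_num)
        (fun i x hi => by norm_num [show i ≠ 1 by omega]) cs).trans ?_
    simp only [pvChops, pvFlatMapSingleton, pvStrips, List.map_take, List.map_drop]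
  by_cases hU : t = "U"
  · subst hU
    simp only [String.reduceEq, reduceIte, false_or, false_and, or_false, or_true, if_true]
    rw [pvFoldlEq (fun i x => if i = 1 then [pvStripComma x] else [PySem.Str.strip x]) cs
        _ (by intro acc i; by_cases h : i = 1 <;> simp [h])]
    refine (pvSegEq (fun i x => if i = 1 then [pvStripComma x] else [PySem.Str.strip x])
        (fun x => [PySem.Str.strip x])
        (fun x => by norm_num) (fun x => by norm_num [pvStripComma])
        (fun x => by norm_num)
        (fun i x hi => by norm_num [show i ≠ 1 by omega]) cs).trans ?_
    simp only [pvChops, pvFlatMapSingleton, pvStrips, List.map_take, List.map_drop]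
  · simp [hR, hI, hS, hB, hJ, hU]
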